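-- pv_equiv track=rewrite | github.com/yusufsuf/video-uretim | backend/services/shot_planner.py | plan_sequences
-- ===== SOURCE A (Python) =====
-- from typing import List, Optional
--
-- KLING_MAX_SEQUENCE_DURATION = 15
--
-- KLING_MIN_SHOT_DURATION = 3
--
-- KLING_MAX_SHOT_DURATION = 10
--
-- MAX_SHOTS_PER_SEQUENCE = 2
--
-- MAX_TOTAL_DURATION = 60
--
-- MIN_TOTAL_DURATION = 6
--
-- _RHYTHM_SHOT_LEN = {
--     "slow":   6,   # paired → 12s/call
--     "normal": 3,   # paired → 6s/call — kullanıcı tercihi: 4s fazla uzun kalıyor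
--     "fast":   3,   # paired → 6s/call (Kling minimum shot)
-- }
--
-- def _rhythm_shot_len(rhythm: str) -> int:
--     return _RHYTHM_SHOT_LEN.get(rhythm, _RHYTHM_SHOT_LEN["normal"])
--
-- def clamp_total_duration(total: int) -> int:
--     return max(MIN_TOTAL_DURATION, min(MAX_TOTAL_DURATION, int(total)))
--
-- def _distribute_total(total: int, n_shots: int) -> List[int]:
--     """Spread `total` seconds across `n_shots` respecting per-shot min/max."""
--     base = total // n_shots
--     extra = total - (base * n_shots)
--     durations = [base + (1 if i < extra else 0) for i in range(n_shots)]
--     return [max(KLING_MIN_SHOT_DURATION, min(KLING_MAX_SHOT_DURATION, d)) for d in durations]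
--
-- def plan_sequences(total_duration: int, rhythm: str = "normal") -> List[List[dict]]:
--     """Split total_duration into shots, grouped into sequences of max 2 shots.
--
--     Returns a list of sequences. Each sequence is a list of shot dicts:
--         {"duration": int, "seq_index": int, "shot_index": int, "global_index": int}
--
--     Example — 40s normal rhythm (target 4s/shot):
--         10 shots of 4s → 5 sequences of [4,4]  → 5 Kling calls
--     Example — 40s slow rhythm (target 6s/shot):
--         7 shots averaging ~5.7s → 4 sequences ([6,6],[6,6],[5,5],[6]) → 4 calls
--     Example — 40s fast rhythm (target 3s/shot):
--         13 shots averaging ~3s → 7 sequences → 7 calls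
--     """
--     total_duration = clamp_total_duration(total_duration)
--     target_shot = _rhythm_shot_len(rhythm)
--
--     # Shot count: keep shots close to target length
--     n_shots = max(1, round(total_duration / target_shot))
--     # Clamp so each shot stays ≥ KLING_MIN_SHOT_DURATION
--     n_shots = min(n_shots, total_duration // KLING_MIN_SHOT_DURATION)
--     n_shots = max(1, n_shots)
--
--     shot_durations = _distribute_total(total_duration, n_shots)
--
--     # Group shots into sequences of ≤ MAX_SHOTS_PER_SEQUENCE, each ≤ 15s
--     sequences: List[List[dict]] = []
--     global_idx = 0
--     seq_index = 0
--     i = 0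
--     while i < len(shot_durations):
--         chunk = shot_durations[i:i + MAX_SHOTS_PER_SEQUENCE]
--         # Safety: if the 2-shot chunk exceeds Kling 15s cap, keep only 1 shot
--         if sum(chunk) > KLING_MAX_SEQUENCE_DURATION and len(chunk) > 1:
--             chunk = chunk[:1]
--             step = 1
--         else:
--             step = len(chunk)
--
--         seq_shots = []
--         for si, d in enumerate(chunk):
--             seq_shots.append({
--                 "duration": int(d),
--                 "seq_index": seq_index,
--                 "shot_index": si,
--                 "global_index": global_idx,
--             })
--             global_idx += 1
--         sequences.append(seq_shots)
--         seq_index += 1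
--         i += step
--
--     return sequences
-- ===== SOURCE B (Python) =====
-- from typing import List
--
-- KLING_MAX_SEQUENCE_DURATION = 15
-- KLING_MIN_SHOT_DURATION = 3
-- KLING_MAX_SHOT_DURATION = 10
-- MAX_SHOTS_PER_SEQUENCE = 2
-- MAX_TOTAL_DURATION = 60
-- MIN_TOTAL_DURATION = 6
--
-- _RHYTHM_SHOT_LEN = {"slow": 6, "normal": 3, "fast": 3}
--
--
-- def plan_sequences(total_duration: int, rhythm: str = "normal") -> List[List[dict]]:
--     """Same planning as A, but the grouping is a single accumulator pass."""
--     total = max(MIN_TOTAL_DURATION, min(MAX_TOTAL_DURATION, int(total_duration)))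
--     target = _RHYTHM_SHOT_LEN.get(rhythm, _RHYTHM_SHOT_LEN["normal"])
--
--     n_shots = max(1, min(max(1, round(total / target)), total // KLING_MIN_SHOT_DURATION))
--
--     base, extra = divmod(total, n_shots)
--     durations = [min(KLING_MAX_SHOT_DURATION, max(KLING_MIN_SHOT_DURATION, d))
--                  for d in [base + 1] * extra + [base] * (n_shots - extra)]
--
--     sequences: List[List[dict]] = []
--     cur: List[dict] = []
--     cur_sum = 0
--     for g, d in enumerate(durations):
--         if cur and (len(cur) == MAX_SHOTS_PER_SEQUENCE
--                     or cur_sum + d > KLING_MAX_SEQUENCE_DURATION):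
--             sequences.append(cur)
--             cur, cur_sum = [], 0
--         cur.append({"duration": d, "seq_index": len(sequences),
--                     "shot_index": len(cur), "global_index": g})
--         cur_sum += d
--     sequences.append(cur)
--     return sequences
-- ===== Notes on version B (the rewrite author's own statement) =====
-- stated objective: simpler
-- what changed: The grouping replaces the index-and-slice while-loop (chunk = durations[i:i+2], conditional re-slice, inner enumerate loop, manual step/index bookkeeping) with a single accumulator pass over the durations that keeps the current sequence and its running sum and closes it when it has 2 shots or adding the next shot would exceed 15s; _distribute_total becomes divmod plus list replication instead of a range comprehension with a per-index conditional.
import Mathlib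
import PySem

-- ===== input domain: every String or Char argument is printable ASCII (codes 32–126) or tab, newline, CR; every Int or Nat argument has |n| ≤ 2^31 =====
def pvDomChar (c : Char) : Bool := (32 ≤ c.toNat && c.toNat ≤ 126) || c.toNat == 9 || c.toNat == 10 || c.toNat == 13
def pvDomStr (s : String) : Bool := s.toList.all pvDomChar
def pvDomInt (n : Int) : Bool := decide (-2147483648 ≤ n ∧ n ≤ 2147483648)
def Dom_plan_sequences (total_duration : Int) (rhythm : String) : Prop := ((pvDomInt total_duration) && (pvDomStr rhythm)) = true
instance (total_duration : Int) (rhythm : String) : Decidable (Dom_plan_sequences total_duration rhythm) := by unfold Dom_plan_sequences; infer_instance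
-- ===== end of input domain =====

-- B replaces A's index-and-slice while-loop grouping by a single accumulator pass
-- (current sequence + running sum); objective: simpler, same cost.

-- ===== PORT A =====

-- round(total / target) in Python: for 6 ≤ total ≤ 60 and target ∈ {3, 6} the float
-- division introduces no tie-relevant rounding error, so Python's result equals
-- round-half-to-even of the exact rational total/target, which this computes.
def pvRoundDivA (a b : Int) : Int :=
  let q := PySem.Int.floordiv a b
  let r := a - q * b
  if 2 * r < b then q
  else if 2 * r > b then q + 1
  else if PySem.Int.mod q 2 = 0 then q else q + 1

def pvRhythmDictA : PySem.Dict String Int :=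
  PySem.Dict.ofList [("slow", 6), ("normal", 3), ("fast", 3)]

-- _RHYTHM_SHOT_LEN.get(rhythm, _RHYTHM_SHOT_LEN["normal"]); the inner lookup of the
-- literal key "normal" always succeeds, so its getD default 0 is never used.
def rhythmShotLenA (rhythm : String) : Int :=
  (pvRhythmDictA.get? rhythm).getD ((pvRhythmDictA.get? "normal").getD 0)

def clampTotalDurationA (total : Int) : Int :=
  max 6 (min 60 total)

def distributeTotalA (total : Int) (nShots : Int) : List Int :=
  let base := PySem.Int.floordiv total nShots
  let extra := total - base * nShots
  let durations := (PySem.List.pyRange 0 nShots 1).map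
    (fun i => base + (if i < extra then 1 else 0))
  durations.map (fun d => max 3 (min 10 d))

def mkShotA (d seqIdx shotIdx globalIdx : Int) : List (String × Int) :=
  [("duration", d), ("seq_index", seqIdx), ("shot_index", shotIdx), ("global_index", globalIdx)]

-- the while-loop: chunk = shot_durations[i:i+2]; if sum(chunk) > 15 and len(chunk) > 1,
-- keep only the first shot; recursion on the remaining list replaces the index i.
def groupShotsA : List Int → Int → Int → List (List (List (String × Int)))
  | [], _, _ => []
  | [d], globalIdx, seqIdx => [[mkShotA d seqIdx 0 globalIdx]]
  | d1 :: d2 :: rest, globalIdx, seqIdx =>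
    if d1 + d2 > 15 then
      [mkShotA d1 seqIdx 0 globalIdx] :: groupShotsA (d2 :: rest) (globalIdx + 1) (seqIdx + 1)
    else
      [mkShotA d1 seqIdx 0 globalIdx, mkShotA d2 seqIdx 1 (globalIdx + 1)]
        :: groupShotsA rest (globalIdx + 2) (seqIdx + 1)

def planBodyA (total target : Int) : List (List (List (String × Int))) :=
  let n1 := max 1 (pvRoundDivA total target)
  let n2 := min n1 (PySem.Int.floordiv total 3)
  let nShots := max 1 n2
  groupShotsA (distributeTotalA total nShots) 0 0

def plan_sequences (total_duration : Int) (rhythm : String) : List (List (List (String × Int))) :=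
  planBodyA (clampTotalDurationA total_duration) (rhythmShotLenA rhythm)

-- ===== PORT B =====

-- identical helper computations, distinct copies for B's port
def pvRoundDivB (a b : Int) : Int :=
  let q := PySem.Int.floordiv a b
  let r := a - q * b
  if 2 * r < b then q
  else if 2 * r > b then q + 1
  else if PySem.Int.mod q 2 = 0 then q else q + 1

def pvRhythmDictB : PySem.Dict String Int :=
  PySem.Dict.ofList [("slow", 6), ("normal", 3), ("fast", 3)]

def rhythmShotLenB (rhythm : String) : Int :=
  (pvRhythmDictB.get? rhythm).getD ((pvRhythmDictB.get? "normal").getD 0)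

-- [base+1]*extra + [base]*(n_shots-extra), then the min/max clamp comprehension
def durationsB (total nShots : Int) : List Int :=
  let base := PySem.Int.floordiv total nShots
  let extra := PySem.Int.mod total nShots
  (List.replicate extra.toNat (base + 1) ++ List.replicate (nShots - extra).toNat base).map
    (fun d => min 10 (max 3 d))

def mkShotB (d seqIdx shotIdx globalIdx : Int) : List (String × Int) :=
  [("duration", d), ("seq_index", seqIdx), ("shot_index", shotIdx), ("global_index", globalIdx)]

-- one fold over durations with state (sequences, cur, cur_sum); g from enumerate
def stepB (st : List (List (List (String × Int))) × List (List (String × Int)) × Int)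
    (gd : Int × Int) : List (List (List (String × Int))) × List (List (String × Int)) × Int :=
  let (seqs, cur, curSum) := st
  let (g, d) := gd
  let (seqs, cur, curSum) :=
    if cur ≠ [] ∧ (cur.length = 2 ∨ curSum + d > 15) then (seqs ++ [cur], [], 0)
    else (seqs, cur, curSum)
  (seqs, cur ++ [mkShotB d (seqs.length : Int) (cur.length : Int) g], curSum + d)

def planBodyB (total target : Int) : List (List (List (String × Int))) :=
  let nShots := max 1 (min (max 1 (pvRoundDivB total target)) (PySem.Int.floordiv total 3))
  let st := (PySem.List.enumerate (durationsB total nShots)).foldl stepB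
    (([] : List (List (List (String × Int)))), ([] : List (List (String × Int))), (0 : Int))
  st.1 ++ [st.2.1]

def plan_sequences_alt (total_duration : Int) (rhythm : String) : List (List (List (String × Int))) :=
  planBodyB (max 6 (min 60 total_duration)) (rhythmShotLenB rhythm)

-- ===== PRECONDITION & SPEC =====
def Spec_plan_sequences (total_duration : Int) (rhythm : String) (out : List (List (List (String × Int)))) : Prop := out = plan_sequences_alt total_duration rhythm
instance (total_duration : Int) (rhythm : String) (out : List (List (List (String × Int)))) : Decidable (Spec_plan_sequences total_duration rhythm out) := by unfold Spec_plan_sequences; infer_instance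

-- ===== CLAIM (what is proved, stated in full; the proofs are below) =====
def Claim_equal_plan_sequences : Prop := ∀ (total_duration : Int) (rhythm : String), Dom_plan_sequences total_duration rhythm → Spec_plan_sequences total_duration rhythm (plan_sequences total_duration rhythm)

-- ===== LEMMAS AND PROOFS =====

theorem rhythm_eq (r : String) : rhythmShotLenA r = rhythmShotLenB r := rfl

theorem rhythm_mem (r : String) : rhythmShotLenA r = 3 ∨ rhythmShotLenA r = 6 := by
  have h : pvRhythmDictA = PySem.Dict.mk [("slow", 6), ("normal", 3), ("fast", 3)] := by decide
  unfold rhythmShotLenA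
  rw [h]
  rw [PySem.Dict.get?_mk_cons, PySem.Dict.get?_mk_cons, PySem.Dict.get?_mk_cons]
  split_ifs <;> simp [PySem.Dict.get?]

theorem clamp_bounds (t : Int) :
    6 ≤ clampTotalDurationA t ∧ clampTotalDurationA t ≤ 60 := by
  unfold clampTotalDurationA; omega

set_option maxHeartbeats 2000000 in
theorem body_eq_small3 : ∀ k : Nat, k < 55 →
    planBodyA (6 + (k : Int)) 3 = planBodyB (6 + (k : Int)) 3 := by decide

set_option maxHeartbeats 2000000 in
theorem body_eq_small6 : ∀ k : Nat, k < 55 →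
    planBodyA (6 + (k : Int)) 6 = planBodyB (6 + (k : Int)) 6 := by decide

theorem body_eq (c tg : Int) (h6 : 6 ≤ c) (h60 : c ≤ 60) (htg : tg = 3 ∨ tg = 6) :
    planBodyA c tg = planBodyB c tg := by
  have hk : c = 6 + ((c - 6).toNat : Int) := by omega
  have hlt : (c - 6).toNat < 55 := by omega
  rcases htg with h | h <;> rw [h, hk]
  · exact body_eq_small3 _ hlt
  · exact body_eq_small6 _ hlt

-- ===== VERDICT (by name: the statement is the Claim_ definition above) =====
theorem plan_sequences_spec : Claim_equal_plan_sequences := by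
  intro t r _
  show plan_sequences t r = plan_sequences_alt t r
  unfold plan_sequences plan_sequences_alt
  rw [← rhythm_eq]
  have hc : max 6 (min 60 t) = clampTotalDurationA t := rfl
  rw [hc]
  exact body_eq _ _ (clamp_bounds t).1 (clamp_bounds t).2 (rhythm_mem r)
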